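-- pv_equiv track=rewrite | github.com/zimolab/PyGUIAdapter | pyguiadapter/widgets/extend/pathlist.py | _keep_one_empty_item
-- ===== SOURCE A (Python) =====
-- from typing import Type, List, Literal, Optional, Any, Callable
--
-- def _keep_one_empty_item(items: List[str]) -> List[str]:
--     should_add = True
--     ret = []
--     for item in items:
--         if item is None:
--             item = ""
--         item = str(item)
--         if item != "":
--             ret.append(item)
--             continue
--         # if item == "" and
--         if should_add:
--             ret.append(item)
--             should_add = False
--     return ret
-- ===== SOURCE B (Python) =====
-- def _keep_one_empty_item(items):
--     normalized = ["" if x is None else str(x) for x in items]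
--     if "" not in normalized:
--         return normalized
--     k = normalized.index("")
--     return normalized[:k] + [""] + [v for v in normalized[k + 1:] if v != ""]
-- ===== Notes on version B (the rewrite author's own statement) =====
-- stated objective: alternative
-- what changed: Replaces the stateful flag-driven single loop with a locate-and-slice decomposition: find the index of the first empty item, keep the prefix before it verbatim, keep one empty, and filter empties out of the rest.
import Mathlib
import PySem

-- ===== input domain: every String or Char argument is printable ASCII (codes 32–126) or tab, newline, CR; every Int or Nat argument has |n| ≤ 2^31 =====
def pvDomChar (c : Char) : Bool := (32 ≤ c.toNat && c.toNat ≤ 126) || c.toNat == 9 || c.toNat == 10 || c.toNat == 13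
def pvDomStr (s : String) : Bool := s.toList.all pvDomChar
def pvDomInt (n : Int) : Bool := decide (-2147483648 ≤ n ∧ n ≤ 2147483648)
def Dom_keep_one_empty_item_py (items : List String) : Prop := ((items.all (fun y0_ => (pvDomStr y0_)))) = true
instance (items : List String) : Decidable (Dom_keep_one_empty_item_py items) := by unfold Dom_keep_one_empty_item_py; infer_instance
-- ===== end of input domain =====

-- B replaces A's flag-driven loop with locate-first-empty + slice + filter (same cost, different decomposition).

-- ===== PORT A =====
-- A's for-loop with the mutable flag `should_add`, transcribed as structural
-- recursion carrying the flag; appending to `ret` at each step becomes cons at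
-- that position.  (`item is None` / `str(item)` are identities on List String.)
def keepGoA (shouldAdd : Bool) : List String → List String
  | [] => []
  | item :: rest =>
      if item != "" then item :: keepGoA shouldAdd rest
      else if shouldAdd then item :: keepGoA false rest
      else keepGoA shouldAdd rest

def keep_one_empty_item_py (items : List String) : List String :=
  keepGoA true items

-- ===== PORT B =====
-- Source B: normalization is the identity on List String; `"" not in` / `.index`
-- become findIdx?, the slices become take/drop, the comprehension a filter.
def keep_one_empty_item_py_alt (items : List String) : List String :=
  match items.findIdx? (· == "") with
  | none => items
  | some k => items.take k ++ [""] ++ (items.drop (k + 1)).filter (· != "")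

-- ===== PRECONDITION & SPEC =====
def Spec_keep_one_empty_item_py (items : List String) (out : List String) : Prop := out = keep_one_empty_item_py_alt items
instance (items : List String) (out : List String) : Decidable (Spec_keep_one_empty_item_py items out) := by unfold Spec_keep_one_empty_item_py; infer_instance

-- ===== CLAIM (what is proved, stated in full; the proofs are below) =====
def Claim_equal_keep_one_empty_item_py : Prop := ∀ (items : List String), Dom_keep_one_empty_item_py items → Spec_keep_one_empty_item_py items (keep_one_empty_item_py items)

-- ===== LEMMAS AND PROOFS =====

-- after the first empty item, A keeps exactly the non-empty items
lemma keepGoA_false (l : List String) : keepGoA false l = l.filter (· != "") := by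
  induction l with
  | nil => rfl
  | cons h t ih =>
      by_cases hh : h = ""
      · subst hh; simp [keepGoA, List.filter, ih]
      · have hb : (h == "") = false := by simp [hh]
        simp [keepGoA, List.filter, bne, hb, ih]

lemma keepGoA_true_eq_alt (items : List String) :
    keepGoA true items = keep_one_empty_item_py_alt items := by
  induction items with
  | nil => rfl
  | cons h t ih =>
      by_cases hh : h = ""
      · subst hh
        simp [keepGoA, keep_one_empty_item_py_alt, List.findIdx?_cons, keepGoA_false]
      · have hb : (h == "") = false := by simp [hh]
        simp only [keep_one_empty_item_py_alt, List.findIdx?_cons, hb]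
        simp only [keepGoA, bne, hb, Bool.not_false, ih,
          keep_one_empty_item_py_alt]
        cases hf : t.findIdx? (· == "") with
        | none => simp
        | some k => simp [List.take_succ_cons, List.drop_succ_cons]

-- ===== VERDICT (by name: the statement is the Claim_ definition above) =====
theorem keep_one_empty_item_py_spec : Claim_equal_keep_one_empty_item_py := by
  intro items _
  unfold Spec_keep_one_empty_item_py keep_one_empty_item_py
  exact keepGoA_true_eq_alt items
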